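-- pv_equiv track=rewrite | github.com/Prot0c0lM0nk/protocol_monk | ui/tool_output_presenter.py | _extract_range_bounds
-- ===== SOURCE A (Python) =====
-- from typing import Any, Iterable, Optional
--
-- def _extract_range_bounds(range_data: dict[str, Any]) -> tuple[Optional[Any], Optional[Any]]:
--     start = next(
--         (value for key, value in range_data.items() if str(key).endswith("_start")),
--         None,
--     )
--     end = next(
--         (value for key, value in range_data.items() if str(key).endswith("_end")),
--         None,
--     )
--     return start, end
-- ===== SOURCE B (Python) =====
-- from typing import Any, Optional
--
-- def _extract_range_bounds(range_data: dict[str, Any]) -> tuple[Optional[Any], Optional[Any]]: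
--     start = end = None
--     for key, value in range_data.items():
--         if start is None and str(key).endswith("_start"):
--             start = value
--         if end is None and str(key).endswith("_end"):
--             end = value
--         if start is not None and end is not None:
--             break
--     return start, end
-- ===== Notes on version B (the rewrite author's own statement) =====
-- stated objective: faster
-- what changed: Replaces A's two independent generator scans over range_data.items() with a single loop that maintains both bounds at once (first match wins) and breaks early once both are found.
import Mathlib
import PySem

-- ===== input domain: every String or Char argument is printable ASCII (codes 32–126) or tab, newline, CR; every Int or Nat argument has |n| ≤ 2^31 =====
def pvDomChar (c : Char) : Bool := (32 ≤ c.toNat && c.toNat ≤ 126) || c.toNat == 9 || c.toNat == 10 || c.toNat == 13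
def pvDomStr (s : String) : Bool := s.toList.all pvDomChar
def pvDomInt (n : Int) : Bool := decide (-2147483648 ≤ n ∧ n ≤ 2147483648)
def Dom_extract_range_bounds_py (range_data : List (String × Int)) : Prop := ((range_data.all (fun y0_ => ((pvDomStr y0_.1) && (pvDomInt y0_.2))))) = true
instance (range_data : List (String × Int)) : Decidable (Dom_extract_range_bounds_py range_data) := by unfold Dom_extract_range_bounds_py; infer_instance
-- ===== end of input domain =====

-- ===== PORT A =====
-- B changes only the scanning decomposition; both ports view the argument as a Python
-- dict (PySem.Dict.ofList: later duplicate keys overwrite) and read its items.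
-- first value whose key ends with "_start": next((v for k, v in items if str(k).endswith("_start")), None)
def pyFirstWith (suffix : String) : List (String × Int) → Option Int
  | [] => none
  | (k, v) :: rest => if PySem.Str.endswith k suffix then some v else pyFirstWith suffix rest

def extract_range_bounds_py (range_data : List (String × Int)) : List (Option Int) :=
  let items := (PySem.Dict.ofList range_data).items
  let start := pyFirstWith "_start" items
  let «end» := pyFirstWith "_end" items
  [start, «end»]

-- ===== PORT B =====
-- single pass keeping both bounds, assigning each only while still None, breaking once both are set
def bLoop : List (String × Int) → Option Int → Option Int → List (Option Int)
  | [], s, e => [s, e]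
  | (k, v) :: rest, s, e =>
    let s' := if s.isNone && PySem.Str.endswith k "_start" then some v else s
    let e' := if e.isNone && PySem.Str.endswith k "_end" then some v else e
    if s'.isSome && e'.isSome then [s', e'] else bLoop rest s' e'

def extract_range_bounds_py_alt (range_data : List (String × Int)) : List (Option Int) :=
  bLoop (PySem.Dict.ofList range_data).items none none

-- ===== PRECONDITION & SPEC =====
def Spec_extract_range_bounds_py (range_data : List (String × Int)) (out : List (Option Int)) : Prop := out = extract_range_bounds_py_alt range_data
instance (range_data : List (String × Int)) (out : List (Option Int)) : Decidable (Spec_extract_range_bounds_py range_data out) := by unfold Spec_extract_range_bounds_py; infer_instance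

-- ===== CLAIM =====
def Claim_equal_extract_range_bounds_py : Prop := ∀ (range_data : List (String × Int)), Dom_extract_range_bounds_py range_data → Spec_extract_range_bounds_py range_data (extract_range_bounds_py range_data)

-- ===== LEMMAS AND PROOFS =====
theorem orElse_firstWith (suffix : String) (s : Option Int) (k : String) (v : Int)
    (rest : List (String × Int)) :
    ((if s.isNone && PySem.Str.endswith k suffix then some v else s).or
      (pyFirstWith suffix rest)) = s.or (pyFirstWith suffix ((k, v) :: rest)) := by
  cases s with
  | some a => simp [pyFirstWith]
  | none => simp only [pyFirstWith, Option.isNone_none, Bool.true_and]; split_ifs <;> simp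

theorem bLoop_eq (l : List (String × Int)) (s e : Option Int) :
    bLoop l s e = [s.or (pyFirstWith "_start" l), e.or (pyFirstWith "_end" l)] := by
  induction l generalizing s e with
  | nil => simp [bLoop, pyFirstWith]
  | cons p rest ih =>
    obtain ⟨k, v⟩ := p
    rw [bLoop]
    have hs := orElse_firstWith "_start" s k v rest
    have he := orElse_firstWith "_end" e k v rest
    set s' := (if (s.isNone && PySem.Str.endswith k "_start") = true then some v else s) with hsd
    set e' := (if (e.isNone && PySem.Str.endswith k "_end") = true then some v else e) with hed
    by_cases hb : (s'.isSome && e'.isSome) = true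
    · rw [if_pos hb, ← hs, ← he]
      obtain ⟨h1, h2⟩ := Bool.and_eq_true_iff.mp hb
      obtain ⟨a, ha⟩ := Option.isSome_iff_exists.mp h1
      obtain ⟨b, hbv⟩ := Option.isSome_iff_exists.mp h2
      rw [ha, hbv]; simp
    · rw [if_neg hb, ih, hs, he]

-- ===== VERDICT =====
theorem extract_range_bounds_py_spec : Claim_equal_extract_range_bounds_py := by
  intro rd _
  unfold Spec_extract_range_bounds_py extract_range_bounds_py extract_range_bounds_py_alt
  rw [bLoop_eq]
  simp
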